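-- pv_equiv track=rewrite | github.com/Alexander-Porter/DevGPT | clean_data.py | is_snippet_has_code_block
-- ===== SOURCE A (Python) =====
-- def is_snippet_has_code_block(snippet):
--     #检查是否有至少2对括号
--     policies=["{","}","[","]","(",")","<",">","="]
--     hit=False
--     for policy in policies:
--         if snippet.count(policy)>1:
--             hit=True
--             break
--     return hit
-- ===== SOURCE B (Python) =====
-- def is_snippet_has_code_block(snippet):
--     # Single sweep with early exit: remember policy chars already seen and
--     # return True the moment one of them shows up a second time.
--     policy = set("{}[]()<>=")
--     seen = set()
--     for ch in snippet:
--         if ch in policy: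
--             if ch in seen:
--                 return True
--             seen.add(ch)
--     return False
-- ===== Notes on version B (the rewrite author's own statement) =====
-- stated objective: idiomatic
-- what changed: B replaces A's nine full snippet.count() scans by one sweep over the snippet with a seen-set, returning True as soon as any policy character appears for the second time (no counting at all).
import Mathlib
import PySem

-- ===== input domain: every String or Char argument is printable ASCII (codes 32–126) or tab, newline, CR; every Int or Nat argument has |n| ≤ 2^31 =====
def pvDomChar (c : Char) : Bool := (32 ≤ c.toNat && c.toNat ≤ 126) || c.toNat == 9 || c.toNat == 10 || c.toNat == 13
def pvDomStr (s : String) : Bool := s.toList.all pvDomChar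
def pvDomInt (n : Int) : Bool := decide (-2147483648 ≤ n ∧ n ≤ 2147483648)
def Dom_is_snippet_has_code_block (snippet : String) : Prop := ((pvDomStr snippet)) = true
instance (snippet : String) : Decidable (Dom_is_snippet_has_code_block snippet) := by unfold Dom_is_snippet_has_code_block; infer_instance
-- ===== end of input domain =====

-- B replaces A's nine snippet.count() scans by a single sweep with a seen-set that
-- returns True at the second occurrence of any policy character (objective: idiomatic).

-- ===== PORT A =====
-- A's 'for policy in policies: if snippet.count(policy)>1: hit=True; break' loop
def aPolicyLoop (snippet : String) : List String → Bool
  | [] => false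
  | p :: rest => if PySem.Str.count snippet p > 1 then true else aPolicyLoop snippet rest

def is_snippet_has_code_block (snippet : String) : Bool :=
  aPolicyLoop snippet ["{", "}", "[", "]", "(", ")", "<", ">", "="]

-- ===== PORT B =====
-- B's 'policy = set("{}[]()<>=")'
def bPolicy : PySem.Set Char := PySem.Set.ofList "{}[]()<>=".toList

-- B's 'for ch in snippet: …' loop carrying the seen-set, with the early return
def bLoop (seen : PySem.Set Char) : List Char → Bool
  | [] => false
  | c :: rest =>
    if PySem.Set.contains bPolicy c then
      if PySem.Set.contains seen c then true
      else bLoop (PySem.Set.add seen c) rest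
    else bLoop seen rest

def is_snippet_has_code_block_alt (snippet : String) : Bool :=
  bLoop PySem.Set.empty snippet.toList

-- ===== PRECONDITION & SPEC =====
def Spec_is_snippet_has_code_block (snippet : String) (out : Bool) : Prop := out = is_snippet_has_code_block_alt snippet
instance (snippet : String) (out : Bool) : Decidable (Spec_is_snippet_has_code_block snippet out) := by unfold Spec_is_snippet_has_code_block; infer_instance

-- ===== CLAIM (what is proved, stated in full; the proofs are below) =====
def Claim_equal_is_snippet_has_code_block : Prop := ∀ (snippet : String), Dom_is_snippet_has_code_block snippet → Spec_is_snippet_has_code_block snippet (is_snippet_has_code_block snippet)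

-- ===== LEMMAS AND PROOFS =====
-- Python's s.count(sub) for a single-character sub equals List.count of that character.
theorem count_go_single (c : Char) : ∀ (fuel : Nat) (s : List Char) (acc : Nat),
    s.length ≤ fuel → PySem.Chars.count.go [c] fuel s acc = acc + s.count c := by
  intro fuel
  induction fuel with
  | zero =>
    intro s acc h
    have : s = [] := List.eq_nil_of_length_eq_zero (Nat.le_zero.mp h)
    subst this; simp [PySem.Chars.count.go]
  | succ n ih =>
    intro s acc h
    cases s with
    | nil => simp [PySem.Chars.count.go]
    | cons hd t =>
      simp only [PySem.Chars.count.go]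
      by_cases hc : c = hd
      · subst hc
        simp [List.isPrefixOf, ih t (acc + 1) (by simpa using h)]
        omega
      · simp [List.isPrefixOf, hc, Ne.symm hc, ih t acc (by simp at h; omega)]

theorem count_single (s : List Char) (c : Char) : PySem.Chars.count s [c] = s.count c := by
  simp [PySem.Chars.count, count_go_single c s.length s 0 le_rfl]

-- PySem.Set.contains as membership
theorem contains_mem {s : PySem.Set Char} {c : Char} :
    PySem.Set.contains s c = true ↔ c ∈ s := by
  simp [PySem.Set.contains]

-- Characterisation of B's sweep: it reports true iff some policy character was
-- either already in the seen-set and occurs again, or occurs at least twice.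
theorem bLoop_iff : ∀ (l : List Char) (seen : PySem.Set Char),
    bLoop seen l = true ↔
      ∃ c, c ∈ bPolicy ∧ ((c ∈ seen ∧ c ∈ l) ∨ 2 ≤ l.count c) := by
  intro l
  induction l with
  | nil => intro seen; simp [bLoop]
  | cons c rest ih =>
    intro seen
    simp only [bLoop, contains_mem]
    by_cases hp : c ∈ bPolicy
    · by_cases hs : c ∈ seen
      · simp only [hp, hs, if_true]
        constructor
        · intro _; exact ⟨c, hp, Or.inl ⟨hs, List.mem_cons_self⟩⟩
        · intro _; trivial
      · simp only [hp, hs, if_true, if_false, ih]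
        constructor
        · rintro ⟨d, hdp, hcase⟩
          by_cases hdc : d = c
          · subst hdc
            refine ⟨d, hdp, Or.inr ?_⟩
            rcases hcase with ⟨_, hin⟩ | hcnt
            · have h1 : 1 ≤ rest.count d := List.count_pos_iff.mpr hin
              rw [List.count_cons_self]; omega
            · rw [List.count_cons_self]; omega
          · refine ⟨d, hdp, ?_⟩
            rcases hcase with ⟨hmem, hin⟩ | hcnt
            · rcases (PySem.Set.mem_add seen c d).mp hmem with h | h
              · exact Or.inl ⟨h, List.mem_cons_of_mem _ hin⟩
              · exact absurd h hdc
            · exact Or.inr (by rw [List.count_cons_of_ne (Ne.symm hdc)]; exact hcnt)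
        · rintro ⟨d, hdp, hcase⟩
          by_cases hdc : d = c
          · subst hdc
            rcases hcase with ⟨hmem, _⟩ | hcnt
            · exact absurd hmem hs
            · rw [List.count_cons_self] at hcnt
              have hin : d ∈ rest := List.count_pos_iff.mp (by omega)
              exact ⟨d, hdp, Or.inl ⟨(PySem.Set.mem_add seen d d).mpr (Or.inr rfl), hin⟩⟩
          · refine ⟨d, hdp, ?_⟩
            rcases hcase with ⟨hmem, hin⟩ | hcnt
            · refine Or.inl ⟨(PySem.Set.mem_add seen c d).mpr (Or.inl hmem), ?_⟩
              cases hin with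
              | head => exact absurd rfl hdc
              | tail _ h => exact h
            · exact Or.inr (by rw [List.count_cons_of_ne (Ne.symm hdc)] at hcnt; exact hcnt)
    · simp only [hp, if_false, ih]
      constructor
      · rintro ⟨d, hdp, hcase⟩
        have hdc : d ≠ c := fun h => hp (h ▸ hdp)
        refine ⟨d, hdp, ?_⟩
        rcases hcase with ⟨hmem, hin⟩ | hcnt
        · exact Or.inl ⟨hmem, List.mem_cons_of_mem _ hin⟩
        · exact Or.inr (by rw [List.count_cons_of_ne (Ne.symm hdc)]; exact hcnt)
      · rintro ⟨d, hdp, hcase⟩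
        have hdc : d ≠ c := fun h => hp (h ▸ hdp)
        refine ⟨d, hdp, ?_⟩
        rcases hcase with ⟨hmem, hin⟩ | hcnt
        · refine Or.inl ⟨hmem, ?_⟩
          cases hin with
          | head => exact absurd rfl hdc
          | tail _ h => exact h
        · exact Or.inr (by rw [List.count_cons_of_ne (Ne.symm hdc)] at hcnt; exact hcnt)

theorem alt_iff (s : String) :
    is_snippet_has_code_block_alt s = true ↔
      ∃ c, c ∈ bPolicy ∧ 2 ≤ s.toList.count c := by
  unfold is_snippet_has_code_block_alt
  rw [bLoop_iff]
  simp [PySem.Set.empty]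

-- ===== VERDICT (by name: the statement is the Claim_ definition above) =====
set_option maxHeartbeats 1600000 in
theorem is_snippet_has_code_block_spec : Claim_equal_is_snippet_has_code_block := by
  intro snippet _
  unfold Spec_is_snippet_has_code_block
  rw [Bool.eq_iff_iff, alt_iff]
  simp only [is_snippet_has_code_block, aPolicyLoop, PySem.Str.count,
    show ("{" : String).toList = ['{'] from rfl, show ("}" : String).toList = ['}'] from rfl, show ("[" : String).toList = ['['] from rfl, show ("]" : String).toList = [']'] from rfl, show ("(" : String).toList = ['('] from rfl, show (")" : String).toList = [')'] from rfl, show ("<" : String).toList = ['<'] from rfl, show (">" : String).toList = ['>'] from rfl, show ("=" : String).toList = ['='] from rfl,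
    count_single]
  constructor
  · intro h
    split_ifs at h with h1 h2 h3 h4 h5 h6 h7 h8 h9
    · exact ⟨'{', by decide, by omega⟩
    · exact ⟨'}', by decide, by omega⟩
    · exact ⟨'[', by decide, by omega⟩
    · exact ⟨']', by decide, by omega⟩
    · exact ⟨'(', by decide, by omega⟩
    · exact ⟨')', by decide, by omega⟩
    · exact ⟨'<', by decide, by omega⟩
    · exact ⟨'>', by decide, by omega⟩
    · exact ⟨'=', by decide, by omega⟩
  · rintro ⟨c, hcp, hcnt⟩
    have hmem : c ∈ (['{','}','[',']','(',')','<','>','='] : List Char) :=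
      (PySem.Set.mem_ofList "{}[]()<>=".toList c).mp hcp
    simp only [List.mem_cons, List.not_mem_nil, or_false] at hmem
    rcases hmem with rfl|rfl|rfl|rfl|rfl|rfl|rfl|rfl|rfl <;> (split_ifs <;> first | rfl | omega)
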